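-- pv_equiv track=rewrite | github.com/AlvieSpurlock/MathCore | MathCore/MathTypes/Advanced/Topology.py | IsSimplicialComplex
-- ===== SOURCE A (Python) =====
-- import itertools   # combinations, product
--
-- def _fs(s):
--     """Convert any iterable to frozenset."""
--     return frozenset(s)
--
-- def IsSimplicialComplex(simplices):
--     simps = [_fs(s) for s in simplices]
--     for sigma in simps:
--         if len(sigma) == 0:
--             continue                                           # Skip empty simplex
--         for r in range(1, len(sigma)):                         # All proper non-empty faces
--             for face in itertools.combinations(sigma, r):
--                 if _fs(face) not in simps:
--                     return False                               # Face missing → not a complex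
--     return True                                               # All faces present → simplicial complex
-- ===== SOURCE B (Python) =====
-- def IsSimplicialComplex(simplices):
--     # Facet check: closure under codimension-1 faces implies closure under all faces.
--     simps = set(map(frozenset, simplices))
--     for sigma in simps:
--         if len(sigma) <= 1:
--             continue
--         for x in sigma:
--             if sigma - {x} not in simps:
--                 return False
--     return True
-- ===== Notes on version B (the rewrite author's own statement) =====
-- stated objective: alternative
-- what changed: B replaces A's enumeration of every proper non-empty face of every simplex by a codimension-1 facet check (one vertex removed at a time) over the deduplicated set of simplices, relying on the fact that closure under facets implies closure under all faces.
import Mathlib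
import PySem

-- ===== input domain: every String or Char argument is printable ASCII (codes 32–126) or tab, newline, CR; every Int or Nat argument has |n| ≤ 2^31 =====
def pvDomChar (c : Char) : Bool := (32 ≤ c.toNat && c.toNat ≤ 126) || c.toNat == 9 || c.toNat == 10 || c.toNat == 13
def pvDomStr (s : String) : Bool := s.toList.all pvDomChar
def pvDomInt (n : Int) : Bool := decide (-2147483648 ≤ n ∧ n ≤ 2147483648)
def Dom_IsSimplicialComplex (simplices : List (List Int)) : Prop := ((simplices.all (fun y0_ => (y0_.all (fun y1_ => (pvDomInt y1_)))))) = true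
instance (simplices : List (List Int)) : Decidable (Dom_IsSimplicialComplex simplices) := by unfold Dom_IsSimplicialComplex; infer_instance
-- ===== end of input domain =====

-- B replaces A's exponential enumeration of all proper non-empty faces by a per-vertex
-- codimension-1 facet check over the deduplicated collection (closure under facets implies
-- closure under all faces); same Boolean result.
-- A Python frozenset of ints is modelled by its canonical representative sorted(set(s)),
-- which is exact: two frozensets are equal iff their canonical lists are equal, and
-- membership/len/iteration consumed order-independently are preserved.

-- ===== PORT A =====
-- frozenset(s) as its canonical (strictly increasing) list
def pvFS (s : List Int) : List Int := PySem.List.sorted (PySem.Set.ofList s) (fun x => x) false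

def IsSimplicialComplex (simplices : List (List Int)) : Bool :=
  let simps := simplices.map pvFS
  simps.all (fun sigma =>
    if sigma.length = 0 then true                       -- continue: skip empty simplex
    else (PySem.List.pyRange 1 (PySem.List.len sigma) 1).all (fun r =>
      -- itertools.combinations over the frozenset: each tuple is immediately frozenset'd
      -- and only tested for membership, so the result is iteration-order independent
      (PySem.List.combinations sigma r.toNat).all (fun face =>
        simps.contains (pvFS face))))

-- ===== PORT B =====
def IsSimplicialComplex_alt (simplices : List (List Int)) : Bool :=
  let simps : PySem.Set (List Int) := PySem.Set.ofList (simplices.map pvFS)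
  -- iteration over the set only feeds order-independent all/membership tests
  simps.all (fun sigma =>
    if sigma.length ≤ 1 then true
    else sigma.all (fun x => PySem.Set.contains simps (PySem.Set.diff sigma [x])))

-- ===== PRECONDITION & SPEC =====
def Spec_IsSimplicialComplex (simplices : List (List Int)) (out : Bool) : Prop := out = IsSimplicialComplex_alt simplices
instance (simplices : List (List Int)) (out : Bool) : Decidable (Spec_IsSimplicialComplex simplices out) := by unfold Spec_IsSimplicialComplex; infer_instance

-- ===== CLAIM (what is proved, stated in full; the proofs are below) =====
def Claim_equal_IsSimplicialComplex : Prop := ∀ (simplices : List (List Int)), Dom_IsSimplicialComplex simplices → Spec_IsSimplicialComplex simplices (IsSimplicialComplex simplices)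

-- ===== LEMMAS AND PROOFS =====

-- canonical lists are strictly increasing
theorem pvFS_pairwise (s : List Int) : (pvFS s).Pairwise (· < ·) := by
  unfold pvFS
  exact PySem.List.sorted_ofList_pairwise_lt s

-- pvFS is the identity on strictly increasing lists
theorem pvFS_eq_self (l : List Int) (h : l.Pairwise (· < ·)) : pvFS l = l := by
  unfold pvFS
  rw [PySem.Set.ofList_eq_self_of_nodup l h.nodup]
  exact PySem.List.sorted_eq_self_of_pairwise l (fun x => x) (h.imp le_of_lt)

-- a Nodup list with every element in another list is no longer than it
theorem nodup_subset_length_le {l1 l2 : List Int} (h : l1.Nodup) (hs : l1 ⊆ l2) :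
    l1.length ≤ l2.length := by
  calc l1.length = l1.toFinset.card := (List.toFinset_card_of_nodup h).symm
  _ ≤ l2.toFinset.card := Finset.card_le_card (fun x hx => by
      simp only [List.mem_toFinset] at *; exact hs hx)
  _ ≤ l2.length := List.toFinset_card_le l2

-- "closed under all proper non-empty faces" (A's condition, on canonical lists)
def PropS (S : List (List Int)) : Prop :=
  ∀ σ ∈ S, ∀ τ : List Int, τ.Sublist σ → 1 ≤ τ.length → τ.length < σ.length → τ ∈ S

-- "closed under codimension-1 facets" (B's condition)
def PropB (S : List (List Int)) : Prop :=
  ∀ σ ∈ S, 2 ≤ σ.length → ∀ x ∈ σ, σ.filter (fun a => a ≠ x) ∈ S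

theorem filter_ne_length {σ : List Int} {x : Int} (hnd : σ.Nodup) (hx : x ∈ σ) :
    (σ.filter (fun a => a ≠ x)).length + 1 = σ.length := by
  have he : σ.erase x = σ.filter (fun a => a ≠ x) := by
    rw [List.Nodup.erase_eq_filter hnd]
    apply List.filter_congr
    intro a _
    simp [bne]
    exact (Bool.beq_eq_decide_eq a x)
  have hpos : 0 < σ.length := List.length_pos_of_mem hx
  rw [← he, List.length_erase_of_mem hx]
  omega

theorem propS_to_propB {S : List (List Int)} (hpw : ∀ σ ∈ S, σ.Pairwise (· < ·))
    (h : PropS S) : PropB S := by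
  intro σ hσ hlen x hx
  have hlen' := filter_ne_length (hpw σ hσ).nodup hx
  exact h σ hσ _ List.filter_sublist (by omega) (by omega)

theorem propB_aux {S : List (List Int)} (hpw : ∀ σ ∈ S, σ.Pairwise (· < ·))
    (h : PropB S) : ∀ n σ, σ ∈ S → σ.length ≤ n →
      ∀ τ : List Int, τ.Sublist σ → 1 ≤ τ.length → τ.length < σ.length → τ ∈ S := by
  intro n
  induction n with
  | zero => intro σ _ hle τ _ h1 h2; omega
  | succ n ih =>
    intro σ hσ hle τ hsub h1 h2
    have hndσ : σ.Nodup := (hpw σ hσ).nodup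
    by_cases hall : ∀ x ∈ σ, x ∈ τ
    · have : σ.length ≤ τ.length := nodup_subset_length_le hndσ hall
      omega
    · push Not at hall
      obtain ⟨x, hxσ, hxτ⟩ := hall
      have hσ' : σ.filter (fun a => a ≠ x) ∈ S := h σ hσ (by omega) x hxσ
      have hlen' := filter_ne_length hndσ hxσ
      have hτsub : τ.Sublist (σ.filter (fun a => a ≠ x)) := by
        have hf : (τ.filter (fun a => a ≠ x)).Sublist (σ.filter (fun a => a ≠ x)) :=
          hsub.filter _
        rwa [List.filter_eq_self.mpr (by intro a ha; simp; rintro rfl; exact hxτ ha)] at hf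
      by_cases hle' : τ.length = (σ.filter (fun a => a ≠ x)).length
      · rwa [hτsub.eq_of_length hle']
      · have := hτsub.length_le
        exact ih _ hσ' (by omega) τ hτsub h1 (by omega)

theorem propB_to_propS {S : List (List Int)} (hpw : ∀ σ ∈ S, σ.Pairwise (· < ·))
    (h : PropB S) : PropS S := by
  intro σ hσ τ hsub h1 h2
  exact propB_aux hpw h σ.length σ hσ le_rfl τ hsub h1 h2

theorem pw_map (simplices : List (List Int)) :
    ∀ σ ∈ simplices.map pvFS, σ.Pairwise (· < ·) := by
  intro σ hσ
  obtain ⟨s, _, rfl⟩ := List.mem_map.mp hσ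
  exact pvFS_pairwise s

-- A = true ↔ PropS on the mapped collection
theorem A_iff (simplices : List (List Int)) :
    IsSimplicialComplex simplices = true ↔ PropS (simplices.map pvFS) := by
  unfold IsSimplicialComplex PropS
  simp only [List.all_eq_true]
  constructor
  · intro h σ hσ τ hτsub h1 h2
    have hσpw := pw_map simplices σ hσ
    have h' := h σ hσ
    rw [if_neg (by omega)] at h'
    simp only [List.all_eq_true, List.contains_iff_mem] at h'
    have hr : (τ.length : Int) ∈ PySem.List.pyRange 1 (PySem.List.len σ) 1 := by
      rw [PySem.List.mem_pyRange_one, PySem.List.len_eq]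
      constructor <;> [exact_mod_cast h1; exact_mod_cast h2]
    have hface : τ ∈ PySem.List.combinations σ ((τ.length : Int)).toNat := by
      rw [PySem.List.mem_combinations_iff]
      exact ⟨hτsub, by simp⟩
    have hm := h' _ hr _ hface
    rwa [pvFS_eq_self τ (hσpw.sublist hτsub)] at hm
  · intro h σ hσ
    have hσpw := pw_map simplices σ hσ
    by_cases h0 : σ.length = 0
    · rw [if_pos h0]
    · rw [if_neg h0]
      simp only [List.all_eq_true, List.contains_iff_mem]
      intro r hr face hface
      rw [PySem.List.mem_pyRange_one, PySem.List.len_eq] at hr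
      rw [PySem.List.mem_combinations_iff] at hface
      obtain ⟨hfsub, hflen⟩ := hface
      rw [pvFS_eq_self face (hσpw.sublist hfsub)]
      have hrpos : 1 ≤ face.length := by omega
      exact h σ hσ face hfsub hrpos (by omega)

-- B = true ↔ PropB on the mapped collection
theorem B_iff (simplices : List (List Int)) :
    IsSimplicialComplex_alt simplices = true ↔ PropB (simplices.map pvFS) := by
  unfold IsSimplicialComplex_alt PropB
  have hdiff : ∀ (σ : List Int) (x : Int), PySem.Set.diff σ [x] = σ.filter (fun a => a ≠ x) := by
    intro σ x; simp [PySem.Set.diff]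
  simp only [List.all_eq_true]
  constructor
  · intro h σ hσ hlen x hx
    have h' := h σ (by rw [PySem.Set.mem_ofList]; exact hσ)
    rw [if_neg (by omega)] at h'
    simp only [List.all_eq_true, PySem.Set.contains_eq_listContains, List.contains_iff_mem] at h'
    have hm := h' x hx
    rw [hdiff] at hm
    rwa [PySem.Set.mem_ofList] at hm
  · intro h σ hσ
    rw [PySem.Set.mem_ofList] at hσ
    by_cases h1 : σ.length ≤ 1
    · rw [if_pos h1]
    · rw [if_neg h1]
      simp only [List.all_eq_true, PySem.Set.contains_eq_listContains, List.contains_iff_mem]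
      intro x hx
      rw [hdiff, PySem.Set.mem_ofList]
      exact h σ hσ (by omega) x hx

-- ===== VERDICT (by name: the statement is the Claim_ definition above) =====
theorem IsSimplicialComplex_spec : Claim_equal_IsSimplicialComplex := by
  intro simplices _
  unfold Spec_IsSimplicialComplex
  have hpw := pw_map simplices
  have hA := A_iff simplices
  have hB := B_iff simplices
  cases hAv : IsSimplicialComplex simplices
  · cases hBv : IsSimplicialComplex_alt simplices
    · rfl
    · exact absurd (hA.mpr (propB_to_propS hpw (hB.mp hBv))) (by simp [hAv])
  · exact (hB.mpr (propS_to_propB hpw (hA.mp hAv))).symm
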